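-- pv_equiv track=rewrite | github.com/Seiya-tanuki/belle-yayoi-replacer | belle/cc_replacer.py | resolve_partial_match_key
-- ===== SOURCE A (Python) =====
-- from typing import Any, Dict, Iterable, List, Optional, Sequence, Set, Tuple
--
-- def resolve_partial_match_key(
--     input_key: str,
--     candidate_keys: Iterable[str],
--     min_len: int,
-- ) -> Optional[str]:
--     key = str(input_key or "")
--     if not key:
--         return None
--     min_len_i = int(min_len)
--     if min_len_i < 1:
--         min_len_i = 1
--
--     matched: Set[str] = set()
--     for candidate in candidate_keys:
--         c = str(candidate or "").strip()
--         if not c: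
--             continue
--         if len(c) < min_len_i:
--             continue
--         if c in key:
--             matched.add(c)
--
--     if not matched:
--         return None
--
--     max_len = max(len(v) for v in matched)
--     longest = sorted(v for v in matched if len(v) == max_len)
--     if len(longest) != 1:
--         return None
--     return longest[0]
-- ===== SOURCE B (Python) =====
-- def resolve_partial_match_key(input_key, candidate_keys, min_len):
--     key = str(input_key or "")
--     if not key:
--         return None
--     m = int(min_len)
--     if m < 1:
--         m = 1
--     best_len = 0
--     top = set()
--     for candidate in candidate_keys:
--         c = str(candidate or "").strip()
--         if not c or len(c) < m or c not in key:
--             continue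
--         if len(c) > best_len:
--             best_len = len(c)
--             top = {c}
--         elif len(c) == best_len:
--             top.add(c)
--     if len(top) == 1:
--         return next(iter(top))
--     return None
-- ===== Notes on version B (the rewrite author's own statement) =====
-- stated objective: alternative
-- what changed: Replaces A's collect-all-matches-into-a-set then max/filter/sort aggregation with a single accumulator pass that tracks the best length and the set of distinct candidates at that length, returning the element iff that set is a singleton.
import Mathlib
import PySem

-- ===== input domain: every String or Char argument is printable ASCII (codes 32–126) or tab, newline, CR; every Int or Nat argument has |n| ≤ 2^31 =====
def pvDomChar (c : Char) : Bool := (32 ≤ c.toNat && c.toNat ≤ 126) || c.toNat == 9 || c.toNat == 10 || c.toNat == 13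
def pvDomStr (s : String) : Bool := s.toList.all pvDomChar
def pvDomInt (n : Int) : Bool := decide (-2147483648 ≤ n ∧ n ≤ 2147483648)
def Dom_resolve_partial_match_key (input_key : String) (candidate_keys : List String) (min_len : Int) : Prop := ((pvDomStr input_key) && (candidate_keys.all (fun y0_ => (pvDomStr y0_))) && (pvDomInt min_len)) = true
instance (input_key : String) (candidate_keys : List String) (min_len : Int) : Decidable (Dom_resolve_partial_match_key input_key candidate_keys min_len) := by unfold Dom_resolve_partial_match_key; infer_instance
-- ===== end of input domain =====

-- B is an alternative single-pass implementation: it tracks the best length and the set of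
-- candidates at that length while scanning, instead of A's collect-set then max/filter/sort.

-- ===== PORT A =====
-- loop body of A's 'for candidate in candidate_keys'
def pvStepA (key : String) (min_len_i : Int) (matched : PySem.Set String) (candidate : String) : PySem.Set String :=
  let c := PySem.Str.strip candidate
  if c = "" then matched
  else if (PySem.Str.len c : Int) < min_len_i then matched
  else if PySem.Str.isIn c key then PySem.Set.add matched c
  else matched

def resolve_partial_match_key (input_key : String) (candidate_keys : List String) (min_len : Int) : Option String :=
  let key := input_key
  if key = "" then none
  else
    let min_len_i : Int := if min_len < 1 then 1 else min_len
    let matched : PySem.Set String := candidate_keys.foldl (pvStepA key min_len_i) PySem.Set.empty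
    if matched = [] then none
    else
      match PySem.List.max? (matched.map (fun v => (PySem.Str.len v : Int))) (fun x => x) with
      | none => none  -- unreachable: matched is nonempty
      | some max_len =>
        let longest := PySem.List.sorted (matched.filter (fun v => (PySem.Str.len v : Int) == max_len)) (fun x => x) false
        if longest.length ≠ 1 then none
        else PySem.List.pyGet? longest 0

-- ===== PORT B =====
-- loop body of B's single accumulator pass (state = (best_len, top))
def pvStepB (key : String) (m : Int) (st : Int × PySem.Set String) (candidate : String) : Int × PySem.Set String :=
  let c := PySem.Str.strip candidate
  if c = "" ∨ (PySem.Str.len c : Int) < m ∨ PySem.Str.isIn c key = false then st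
  else if st.1 < (PySem.Str.len c : Int) then ((PySem.Str.len c : Int), [c])
  else if (PySem.Str.len c : Int) = st.1 then (st.1, PySem.Set.add st.2 c)
  else st

def resolve_partial_match_key_alt (input_key : String) (candidate_keys : List String) (min_len : Int) : Option String :=
  if input_key = "" then none
  else
    let m : Int := if min_len < 1 then 1 else min_len
    let st := candidate_keys.foldl (pvStepB input_key m) (0, PySem.Set.empty)
    match st.2 with
    | [x] => some x
    | _ => none

-- ===== PRECONDITION & SPEC =====
def Spec_resolve_partial_match_key (input_key : String) (candidate_keys : List String) (min_len : Int) (out : Option String) : Prop := out = resolve_partial_match_key_alt input_key candidate_keys min_len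
instance (input_key : String) (candidate_keys : List String) (min_len : Int) (out : Option String) : Decidable (Spec_resolve_partial_match_key input_key candidate_keys min_len out) := by unfold Spec_resolve_partial_match_key; infer_instance

-- ===== CLAIM (what is proved, stated in full; the proofs are below) =====
def Claim_equal_resolve_partial_match_key : Prop := ∀ (input_key : String) (candidate_keys : List String) (min_len : Int), Dom_resolve_partial_match_key input_key candidate_keys min_len → Spec_resolve_partial_match_key input_key candidate_keys min_len (resolve_partial_match_key input_key candidate_keys min_len)

-- ===== LEMMAS AND PROOFS =====

-- The loop invariant relating A's matched-set fold to B's (best_len, top) fold.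
def pvInvP (s : List String) (b : Int) (t : List String) : Prop :=
  (∀ v ∈ s, (PySem.Str.len v : Int) ≤ b) ∧
  t = s.filter (fun v => (PySem.Str.len v : Int) == b) ∧
  (s = [] → b = 0) ∧
  (s ≠ [] → t ≠ [])

set_option maxHeartbeats 1000000 in
lemma pvInv_step (key : String) (m : Int) (cand : String) (s : List String) (b : Int) (t : List String)
    (h : pvInvP s b t) :
    pvInvP (pvStepA key m s cand) (pvStepB key m (b, t) cand).1 (pvStepB key m (b, t) cand).2 := by
  obtain ⟨h1, h2, h3, h4⟩ := h
  unfold pvStepA pvStepB pvInvP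
  set c := PySem.Str.strip cand with hc
  by_cases hce : c = ""
  · rw [if_pos hce, if_pos (Or.inl hce)]
    exact ⟨h1, h2, h3, h4⟩
  by_cases hlm : (PySem.Str.len c : Int) < m
  · rw [if_neg hce, if_pos hlm, if_pos (Or.inr (Or.inl hlm))]
    exact ⟨h1, h2, h3, h4⟩
  by_cases hin : PySem.Str.isIn c key = true
  · rw [if_neg hce, if_neg hlm, if_pos hin,
      if_neg (fun hor => by
        rcases hor with h | h | h
        · exact hce h
        · exact hlm h
        · rw [hin] at h; cases h)]
    by_cases hgt : b < (PySem.Str.len c : Int)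
    · -- strictly longer: c cannot already be in s
      have hcns : c ∉ s := fun hmem => absurd (h1 c hmem) (by omega)
      have hadd : PySem.Set.add s c = s ++ [c] := by
        simp [PySem.Set.add, PySem.Set.contains_iff, hcns]
      rw [if_pos hgt, hadd]
      refine ⟨?_, ?_, ?_, ?_⟩
      · intro v hv
        rcases List.mem_append.mp hv with hv | hv
        · exact le_of_lt (lt_of_le_of_lt (h1 v hv) hgt)
        · simp at hv; simp [hv]
      · show [c] = _
        have hz : s.filter (fun v => (PySem.Str.len v : Int) == (PySem.Str.len c : Int)) = [] := by
          apply List.filter_eq_nil_iff.mpr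
          intro v hv
          have := h1 v hv
          simp only [beq_iff_eq]
          omega
        rw [List.filter_append, hz, List.nil_append]
        simp
      · intro hnil; simp at hnil
      · intro _; simp
    · have hle : (PySem.Str.len c : Int) ≤ b := le_of_not_gt hgt
      by_cases heq : (PySem.Str.len c : Int) = b
      · -- equal length
        have hbeq : (PySem.Str.len c == b) = true := by simp only [beq_iff_eq]; exact heq
        rw [if_neg hgt, if_pos heq]
        by_cases hcs : c ∈ s
        · have haddA : PySem.Set.add s c = s := by
            simp [PySem.Set.add, PySem.Set.contains_iff, hcs]
          have hct : c ∈ t := by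
            rw [h2]; exact List.mem_filter.mpr ⟨hcs, hbeq⟩
          have haddB : PySem.Set.add t c = t := by
            simp [PySem.Set.add, PySem.Set.contains_iff, hct]
          dsimp only
          rw [haddA, haddB]
          exact ⟨h1, h2, h3, h4⟩
        · have haddA : PySem.Set.add s c = s ++ [c] := by
            simp [PySem.Set.add, PySem.Set.contains_iff, hcs]
          have hcnt : c ∉ t := fun hmem => hcs (List.mem_filter.mp (h2 ▸ hmem)).1
          have haddB : PySem.Set.add t c = t ++ [c] := by
            simp [PySem.Set.add, PySem.Set.contains_iff, hcnt]
          dsimp only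
          rw [haddA, haddB]
          refine ⟨?_, ?_, ?_, ?_⟩
          · intro v hv
            rcases List.mem_append.mp hv with hv | hv
            · exact h1 v hv
            · simp at hv; subst hv; exact le_of_eq heq
          · rw [List.filter_append, h2, List.filter_cons, hbeq]
            simp
          · intro hnil; simp at hnil
          · intro _; simp
      · -- strictly shorter
        have hlt : (PySem.Str.len c : Int) < b := lt_of_le_of_ne hle heq
        have hbne : (PySem.Str.len c == b) = false := by simp only [beq_eq_false_iff_ne, ne_eq]; exact heq
        rw [if_neg hgt, if_neg heq]
        by_cases hcs : c ∈ s
        · have haddA : PySem.Set.add s c = s := by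
            simp [PySem.Set.add, PySem.Set.contains_iff, hcs]
          rw [haddA]; exact ⟨h1, h2, h3, h4⟩
        · have haddA : PySem.Set.add s c = s ++ [c] := by
            simp [PySem.Set.add, PySem.Set.contains_iff, hcs]
          rw [haddA]
          refine ⟨?_, ?_, ?_, ?_⟩
          · intro v hv
            rcases List.mem_append.mp hv with hv | hv
            · exact h1 v hv
            · simp at hv; subst hv; omega
          · show t = _
            rw [List.filter_append, h2]
            rw [List.filter_cons, hbne]
            simp
          · intro hnil; simp at hnil
          · intro hne
            apply h4
            intro hs
            have hb0 : b = 0 := h3 hs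
            have : (0:Int) ≤ (PySem.Str.len c : Int) := Int.natCast_nonneg _
            omega
  · rw [Bool.not_eq_true] at hin
    rw [if_neg hce, if_neg hlm, if_neg (by rw [hin]; simp),
      if_pos (Or.inr (Or.inr hin))]
    exact ⟨h1, h2, h3, h4⟩

lemma pvInv_fold (key : String) (m : Int) (cs : List String) :
    ∀ (s : List String) (b : Int) (t : List String), pvInvP s b t →
    pvInvP (cs.foldl (pvStepA key m) s) (cs.foldl (pvStepB key m) (b, t)).1
      (cs.foldl (pvStepB key m) (b, t)).2 := by
  induction cs with
  | nil => intro s b t h; simpa using h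
  | cons cand cs ih =>
    intro s b t h
    have hstep := pvInv_step key m cand s b t h
    simpa [List.foldl_cons] using ih _ _ _ hstep

-- ===== VERDICT (by name: the statement is the Claim_ definition above) =====
theorem resolve_partial_match_key_spec : Claim_equal_resolve_partial_match_key := by
  intro input_key candidate_keys min_len _
  unfold Spec_resolve_partial_match_key resolve_partial_match_key resolve_partial_match_key_alt
  by_cases hk : input_key = ""
  · simp [hk]
  simp only [if_neg hk]
  set m : Int := if min_len < 1 then 1 else min_len with hm
  set matched := candidate_keys.foldl (pvStepA input_key m) PySem.Set.empty with hmat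
  set st := candidate_keys.foldl (pvStepB input_key m) (0, PySem.Set.empty) with hst
  have hinv : pvInvP matched st.1 st.2 := by
    rw [hmat, hst]
    exact pvInv_fold input_key m candidate_keys [] 0 [] ⟨by simp, by simp [PySem.Set.empty], by simp, by simp⟩
  obtain ⟨h1, h2, h3, h4⟩ := hinv
  by_cases hemp : matched = []
  · have : st.2 = [] := by rw [h2, hemp]; simp
    simp [hemp, this]
  · simp only [if_neg hemp]
    have htne : st.2 ≠ [] := h4 hemp
    -- max? returns st.1
    have hmapne : matched.map (fun v => (PySem.Str.len v : Int)) ≠ [] := by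
      simpa using hemp
    obtain ⟨M, hM⟩ : ∃ M, PySem.List.max? (matched.map (fun v => (PySem.Str.len v : Int))) (fun x => x) = some M := by
      cases hx : PySem.List.max? (matched.map (fun v => (PySem.Str.len v : Int))) (fun x => x) with
      | none => exact absurd ((PySem.List.max?_eq_none_iff _ _).mp hx) hmapne
      | some M => exact ⟨M, rfl⟩
    have hMmem : M ∈ matched.map (fun v => (PySem.Str.len v : Int)) := PySem.List.max?_mem hM
    have hMmax : ∀ y ∈ matched.map (fun v => (PySem.Str.len v : Int)), y ≤ M :=
      PySem.List.max?_isMax hM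
    -- st.1 occurs as a length in matched (st.2 is a nonempty sublist of the filter)
    obtain ⟨x0, hx0t⟩ := List.exists_mem_of_ne_nil st.2 htne
    have hx0f := h2 ▸ hx0t
    have hx0m : x0 ∈ matched := (List.mem_filter.mp hx0f).1
    have hx0len : (PySem.Str.len x0 : Int) = st.1 := by
      have := (List.mem_filter.mp hx0f).2; simpa using this
    have hb_mem : st.1 ∈ matched.map (fun v => (PySem.Str.len v : Int)) :=
      List.mem_map.mpr ⟨x0, hx0m, hx0len⟩
    have hMb : M = st.1 := by
      have h₁ : st.1 ≤ M := hMmax _ hb_mem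
      obtain ⟨v, hvm, hvM⟩ := List.mem_map.mp hMmem
      have h₂ : M ≤ st.1 := hvM ▸ h1 v hvm
      omega
    rw [hM, hMb]
    dsimp only
    have hfilt : matched.filter (fun v => (PySem.Str.len v : Int) == st.1) = st.2 := h2.symm
    rw [hfilt]
    have hperm : (PySem.List.sorted st.2 (fun x => x) false).Perm st.2 := PySem.List.sorted_perm _ _ _
    match hsnd : st.2 with
    | [x] =>
      have : PySem.List.sorted [x] (fun y => y) false = [x] :=
        List.perm_singleton.mp (hsnd ▸ hperm)
      rw [this]
      simp [PySem.List.pyGet?, PySem.List.pyIdx?]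
    | [] => exact absurd hsnd htne
    | x :: y :: rest =>
      have hlen : (PySem.List.sorted (x :: y :: rest) (fun z => z) false).length = rest.length + 2 := by
        simpa using (hsnd ▸ hperm).length_eq
      simp [hlen]
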